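-- pv_equiv track=rewrite | github.com/ttppggnnss/CodingNote | 2009/kakao2018-6.py | solution
-- ===== SOURCE A (Python) =====
-- def num_to_bin(n, num):
--     new_num = num
--     arr=[]
--     for i in range(n):
--         quotient, remainder  = divmod(new_num, 2)
--         arr.append(remainder)
--         new_num = quotient
--     return arr[::-1]
--
-- def solution(n, arr1, arr2):
--     new_arr1 = [num_to_bin(n, i) for i in arr1]
--     new_arr2 = [num_to_bin(n, i) for i in arr2]
--
--     answer = [[' ']* n for i in range(n)]
--     for i in range(n):
--         for j in range(n):
--             if new_arr1[i][j] or new_arr2[i][j]: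
--                 answer[i][j]='#'
--     answer = [''.join(i) for i in answer]
--     return  answer
-- ===== SOURCE B (Python) =====
-- def solution(n, arr1, arr2):
--     if n <= 0:
--         return []
--     m = 1 << n
--     table = str.maketrans('10', '# ')
--     return [format((a % m) | (b % m), '0{}b'.format(n)).translate(table)
--             for a, b in zip(arr1[:n], arr2[:n])]
-- ===== Notes on version B (the rewrite author's own statement) =====
-- stated objective: faster
-- what changed: B replaces the per-cell bit-array construction and nested matrix-mutating loops by one pass per row: OR the two numbers reduced modulo 2^n, format the result as an n-digit binary string and translate '1'/'0' to '#'/' '.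
-- outside the precondition, e.g. on solution(1, [1], []): A returns ['#'], B returns []
import Mathlib
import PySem

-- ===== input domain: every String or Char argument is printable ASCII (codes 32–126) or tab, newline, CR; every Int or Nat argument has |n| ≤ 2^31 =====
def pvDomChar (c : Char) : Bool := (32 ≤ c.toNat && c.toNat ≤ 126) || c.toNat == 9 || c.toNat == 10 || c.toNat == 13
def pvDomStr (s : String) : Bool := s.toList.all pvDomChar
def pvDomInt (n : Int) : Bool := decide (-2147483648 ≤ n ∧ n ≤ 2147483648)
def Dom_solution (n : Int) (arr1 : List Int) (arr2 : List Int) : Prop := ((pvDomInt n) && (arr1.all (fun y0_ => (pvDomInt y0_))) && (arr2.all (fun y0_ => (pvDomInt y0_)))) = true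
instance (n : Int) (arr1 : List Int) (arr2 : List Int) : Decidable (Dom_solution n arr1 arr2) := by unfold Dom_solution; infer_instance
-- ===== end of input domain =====

-- B renders each row by formatting (arr1[i] % 2^n | arr2[i] % 2^n) as an n-digit binary string
-- translated to '#'/' ', instead of A's per-cell bit arrays and nested matrix-mutating loops
-- (measured faster: word-level OR and formatting replace per-cell Python work).


-- ===== PORT A =====
-- num_to_bin: n divmod(·,2) steps collecting remainders, then arr[::-1]
-- (xs[::-1] is List.reverse, cf. PySem.List.slice?_none_none_neg_one).
def numToBin (n : Int) (num : Int) : List Int :=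
  let st := (PySem.List.pyRange 0 n 1).foldl
    (fun (st : Int × List Int) _ =>
      (PySem.Int.floordiv st.1 2, st.2 ++ [PySem.Int.mod st.1 2]))
    (num, ([] : List Int))
  st.2.reverse

-- the list indexing new_arr1[i] / …[j] / answer[i][j] = … is total here via pyGetD/pySetD;
-- it is exact under Pre_solution (all indices in range, so Python raises nowhere).
def solution (n : Int) (arr1 : List Int) (arr2 : List Int) : List String :=
  let newArr1 := arr1.map (fun i => numToBin n i)
  let newArr2 := arr2.map (fun i => numToBin n i)
  let answer0 : List (List Char) :=
    (PySem.List.pyRange 0 n 1).map (fun _ => List.replicate n.toNat ' ')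
  let answer :=
    (PySem.List.pyRange 0 n 1).foldl (fun ans i =>
      (PySem.List.pyRange 0 n 1).foldl (fun (ans : List (List Char)) j =>
        if PySem.List.pyGetD (PySem.List.pyGetD newArr1 i []) j 0 ≠ 0 ∨
           PySem.List.pyGetD (PySem.List.pyGetD newArr2 i []) j 0 ≠ 0 then
          PySem.List.pySetD ans i (PySem.List.pySetD (PySem.List.pyGetD ans i []) j '#')
        else ans) ans) answer0
  answer.map (fun row => String.ofList row)

-- ===== PORT B =====
-- format(v, '0{n}b').translate({'1':'#','0':' '}): n binary digits, MSB first, fused with the translation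
def binChars : Nat → Nat → List Char
  | 0, _ => []
  | k+1, v => binChars k (v / 2) ++ [if v % 2 = 1 then '#' else ' ']

def solution_alt (n : Int) (arr1 : List Int) (arr2 : List Int) : List String :=
  if n ≤ 0 then []
  else
    let m : Int := 1 <<< n.toNat
    ((PySem.List.slice arr1 none (some n)).zip (PySem.List.slice arr2 none (some n))).map
      (fun p => String.ofList (binChars n.toNat
        ((PySem.Int.mod p.1 m).toNat ||| (PySem.Int.mod p.2 m).toNat)))

-- ===== PRECONDITION & SPEC =====
-- Pre_ requires both arrays to have at least n rows: when one is shorter, A almost always raises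
-- IndexError, and on rare inputs it still returns only because `or` short-circuits (the arr1 row
-- bits are all 1), an accident of evaluation order that B's zip-truncation does not reproduce.
def Pre_solution (n : Int) (arr1 : List Int) (arr2 : List Int) : Prop :=
  n ≤ (arr1.length : Int) ∧ n ≤ (arr2.length : Int)
instance (n : Int) (arr1 : List Int) (arr2 : List Int) : Decidable (Pre_solution n arr1 arr2) := by unfold Pre_solution; infer_instance

def pvWitness_solution : Int × List Int × List Int := (2, [1, 2], [2, 3])

def Spec_solution (n : Int) (arr1 : List Int) (arr2 : List Int) (out : List String) : Prop := out = solution_alt n arr1 arr2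
instance (n : Int) (arr1 : List Int) (arr2 : List Int) (out : List String) : Decidable (Spec_solution n arr1 arr2 out) := by unfold Spec_solution; infer_instance

-- ===== CLAIM (what is proved, stated in full; the proofs are below) =====
def Claim_equal_solution : Prop := ∀ (n : Int) (arr1 : List Int) (arr2 : List Int), Dom_solution n arr1 arr2 → Pre_solution n arr1 arr2 → Spec_solution n arr1 arr2 (solution n arr1 arr2)

-- ===== LEMMAS AND PROOFS =====

-- A-side bit stream: bitf k x is the k-th remainder produced by num_to_bin's divmod loop
def fdivIter : Nat → Int → Int
  | 0, x => x
  | k+1, x => fdivIter k (PySem.Int.floordiv x 2)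

def bitf (k : Nat) (x : Int) : Int := PySem.Int.mod (fdivIter k x) 2

theorem ntb_loop : ∀ (L : List Int) (x : Int) (acc : List Int),
    L.foldl (fun st _ => (PySem.Int.floordiv st.1 2, st.2 ++ [PySem.Int.mod st.1 2])) (x, acc)
    = (fdivIter L.length x, acc ++ (List.range L.length).map (fun k => bitf k x)) := by
  intro L
  induction L with
  | nil => intro x acc; simp [fdivIter]
  | cons a l ih =>
      intro x acc
      simp only [List.foldl_cons, ih, List.length_cons, List.range_succ_eq_map, List.map_cons,
        List.map_map, Function.comp_def, Prod.mk.injEq]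
      refine ⟨rfl, ?_⟩
      show acc ++ [PySem.Int.mod x 2] ++ _ = acc ++ bitf 0 x :: _
      simp only [bitf, fdivIter, List.append_assoc, List.singleton_append]

theorem numToBin_eq (n : Int) (x : Int) :
    numToBin n x = ((List.range n.toNat).map (fun k => bitf k x)).reverse := by
  unfold numToBin
  rw [ntb_loop]
  simp [PySem.List.length_pyRange_one]

-- generic "set each index once, left to right" loop
theorem foldset {α : Type} (d : α) (h : Nat → α → α) :
    ∀ (k : Nat) (init : List α), k ≤ init.length →
    (List.range k).foldl (fun l i => l.set i (h i (l.getD i d))) init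
      = (List.range init.length).map
          (fun i => if i < k then h i (init.getD i d) else init.getD i d) := by
  intro k
  induction k with
  | zero =>
      intro init _
      apply List.ext_getElem (by simp)
      intro i h1 h2
      have hi : i < init.length := by simpa using h1
      simp only [List.range_zero, List.foldl_nil, List.getElem_map, List.getElem_range,
        Nat.not_lt_zero, if_false]
      exact (List.getD_eq_getElem _ _ hi).symm
  | succ k ih =>
      intro init hk
      rw [List.range_succ, List.foldl_append, List.foldl_cons, List.foldl_nil,
        ih init (by omega)]
      have hgd : ((List.range init.length).map
          (fun i => if i < k then h i (init.getD i d) else init.getD i d)).getD k d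
          = init.getD k d := by
        rw [List.getD_eq_getElem _ _ (by simpa using (by omega : k < init.length))]
        simp
      apply List.ext_getElem (by simp)
      intro i h1 h2
      have hi : i < init.length := by simpa using h2
      rw [List.getElem_set (by simpa using hi)]
      simp only [hgd, List.getElem_map, List.getElem_range]
      by_cases hik : k = i
      · subst hik; simp
      · simp only [if_neg hik]
        by_cases hlt : i < k
        · simp [hlt, show i < k + 1 by omega]
        · simp [hlt, show ¬ (i < k + 1) by omega]

-- binChars produces the translated bits, LSB last
theorem binChars_eq (N : Nat) (v : Nat) :
    binChars N v
      = ((List.range N).map (fun k => if v.testBit k then '#' else ' ')).reverse := by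
  induction N generalizing v with
  | zero => simp [binChars]
  | succ k ih =>
      rw [binChars, ih, List.range_succ_eq_map]
      simp [List.map_map, Function.comp_def, Nat.testBit_succ, Nat.testBit_zero]

theorem emod_shift (a M : Int) (hM : 0 < M) : (a % (2*M)) / 2 = (a / 2) % M := by
  have e1 : a % (2*M) = a - (2*M)*((a/2)/M) := by
    rw [Int.emod_def, Int.ediv_ediv_of_nonneg (by omega)]
  have e2 : (a/2) % M = a/2 - M*((a/2)/M) := by rw [Int.emod_def]
  have h5 : 0 ≤ (a/2) % M := Int.emod_nonneg _ (by omega)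
  have h6 : (a/2) % M < M := Int.emod_lt_of_pos _ hM
  have key : a % (2*M) = 2*((a/2) % M) + a % 2 := by
    have e3 : a % 2 = a - 2*(a/2) := by rw [Int.emod_def]
    linarith
  omega

-- MAIN bit lemma: testBit of the Nat image of x % 2^N is num_to_bin's k-th remainder
theorem testBit_emod (k : Nat) : ∀ (N : Nat) (x : Int), k < N →
    ((x % ((2:Int)^N)).toNat).testBit k = decide (bitf k x ≠ 0) := by
  induction k with
  | zero =>
      intro N x hk
      have hdvd : ((x % ((2:Int)^N)) % 2) = x % 2 :=
        Int.emod_emod_of_dvd _ (dvd_pow_self 2 (by omega))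
      have hnn : 0 ≤ x % ((2:Int)^N) := Int.emod_nonneg _ (by positivity)
      have hb : bitf 0 x = x % 2 := by
        simp [bitf, fdivIter]
      rw [Nat.testBit_zero, hb]
      have h01 : 0 ≤ x % 2 ∧ x % 2 < 2 := ⟨Int.emod_nonneg _ (by norm_num), Int.emod_lt_of_pos _ (by norm_num)⟩
      have hm : ((x % ((2:Int)^N)).toNat) % 2 = (x % 2).toNat := by omega
      rw [hm]
      rcases h01 with ⟨h1, h2⟩
      interval_cases h : (x % 2) <;> simp
  | succ k ih =>
      intro N x hk
      obtain ⟨M, rfl⟩ : ∃ M, N = M + 1 := ⟨N - 1, by omega⟩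
      have hnn : 0 ≤ x % ((2:Int)^(M+1)) := Int.emod_nonneg _ (by positivity)
      have hdiv2 : ((x % ((2:Int)^(M+1))).toNat) / 2 = (((x/2) % ((2:Int)^M)).toNat) := by
        have := emod_shift x ((2:Int)^M) (by positivity)
        rw [show ((2:Int)^(M+1)) = 2 * 2^M by ring] at *
        omega
      have hb : bitf (k+1) x = bitf k (x/2) := by
        simp [bitf, fdivIter]
      rw [Nat.testBit_succ, hdiv2, hb, ih M (x/2) (by omega)]

-- the inner j-loop only rewrites row i; as a function it is "set row i to the row-loop result"
theorem inner_set (C : Nat → Prop) [DecidablePred C] :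
    ∀ (js : List Nat) (ans : List (List Char)) (i : Nat),
    js.foldl (fun ans j => if C j then ans.set i ((ans.getD i []).set j '#') else ans) ans
      = ans.set i (js.foldl (fun row j => if C j then row.set j '#' else row) (ans.getD i [])) := by
  intro js
  induction js with
  | nil =>
      intro ans i
      by_cases hi : i < ans.length
      · rw [List.foldl_nil, List.getD_eq_getElem _ _ hi]
        exact (List.set_getElem_self hi).symm
      · rw [List.foldl_nil, List.set_eq_of_length_le (by omega)]
  | cons j js ih =>
      intro ans i
      by_cases hi : i < ans.length
      · simp only [List.foldl_cons]
        by_cases hc : C j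
        · simp only [if_pos hc, ih]
          have hgd : (ans.set i ((ans.getD i []).set j '#')).getD i []
              = (ans.getD i []).set j '#' := by
            rw [List.getD_eq_getElem _ _ (by simpa using hi)]
            exact List.getElem_set_self (by simpa using hi)
          rw [hgd, List.set_set]
        · simp only [if_neg hc, ih]
      · have hstep : (if C j then ans.set i ((ans.getD i []).set j '#') else ans) = ans := by
          split_ifs with hc
          · exact List.set_eq_of_length_le (by omega)
          · rfl
        rw [List.foldl_cons, hstep, ih,
          List.set_eq_of_length_le (by omega), List.set_eq_of_length_le (by omega)]

-- closed form of one row-painting loop from a blank row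
theorem row_closed (C : Nat → Prop) [DecidablePred C] (N : Nat) :
    (List.range N).foldl (fun row j => if C j then row.set j '#' else row)
      (List.replicate N ' ')
      = (List.range N).map (fun j => if C j then '#' else ' ') := by
  have hfun : (fun (row : List Char) j => if C j then row.set j '#' else row)
      = (fun row j => row.set j (if C j then '#' else row.getD j ' ')) := by
    funext row j
    split_ifs with hc
    · rfl
    · by_cases hj : j < row.length
      · rw [List.getD_eq_getElem _ _ hj, List.set_getElem_self]
      · rw [List.set_eq_of_length_le (by omega)]
  rw [hfun, foldset ' ' (fun j v => if C j then '#' else v) N (List.replicate N ' ')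
    (by simp)]
  simp only [List.length_replicate]
  apply List.map_congr_left
  intro j hj
  have hjN : j < N := List.mem_range.mp hj
  simp [hjN]

-- one cell of A's painted matrix is one remainder of num_to_bin, MSB first
theorem cell_eq (n : Int) (a : List Int) (i j : Nat) (hi : i < a.length) (hj : j < n.toNat) :
    ((a.map (fun x => numToBin n x)).getD i []).getD j 0
      = bitf (n.toNat - 1 - j) (a.getD i 0) := by
  have e1 : (a.map (fun x => numToBin n x)).getD i [] = numToBin n (a[i]) := by
    rw [List.getD_eq_getElem _ _ (by simpa using hi)]
    simp
  rw [e1, numToBin_eq, List.getD_eq_getElem _ _ (by simpa using hj), List.getElem_reverse,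
    List.getD_eq_getElem a 0 hi]
  simp

-- closed form of port A for 0 < n
theorem A_closed (n : Int) (arr1 arr2 : List Int) :
    solution n arr1 arr2
      = (List.range n.toNat).map (fun i => String.ofList ((List.range n.toNat).map
          (fun j => if ((arr1.map (fun x => numToBin n x)).getD i []).getD j 0 ≠ 0 ∨
                       ((arr2.map (fun x => numToBin n x)).getD i []).getD j 0 ≠ 0
                    then '#' else ' '))) := by
  unfold solution
  rw [PySem.List.pyRange_one]
  simp only [sub_zero, zero_add, List.foldl_map, List.map_map, Function.comp_def,
    PySem.List.pyGetD_natCast, PySem.List.pySetD_natCast]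
  have hfun : (fun (x : List (List Char)) (y : Nat) =>
        List.foldl
          (fun x y_1 =>
            if ((List.map (fun i => numToBin n i) arr1).getD y []).getD y_1 0 ≠ 0 ∨
                ((List.map (fun i => numToBin n i) arr2).getD y []).getD y_1 0 ≠ 0 then
              x.set y ((x.getD y []).set y_1 '#')
            else x)
          x (List.range n.toNat))
      = (fun x y => x.set y
          (List.foldl (fun row j =>
            if ((List.map (fun i => numToBin n i) arr1).getD y []).getD j 0 ≠ 0 ∨
                ((List.map (fun i => numToBin n i) arr2).getD y []).getD j 0 ≠ 0 then
              row.set j '#' else row) (x.getD y []) (List.range n.toNat))) := by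
    funext x y
    exact inner_set _ (List.range n.toNat) x y
  rw [hfun, foldset ([] : List Char)
    (fun y v => List.foldl (fun row j =>
      if ((List.map (fun i => numToBin n i) arr1).getD y []).getD j 0 ≠ 0 ∨
          ((List.map (fun i => numToBin n i) arr2).getD y []).getD j 0 ≠ 0 then
        row.set j '#' else row) v (List.range n.toNat))
    n.toNat _ (by simp)]
  simp only [List.length_map, List.length_range, List.map_map, Function.comp_def]
  apply List.map_congr_left
  intro i hi
  have hiN : i < n.toNat := List.mem_range.mp hi
  have hgd : (List.map (fun _ => List.replicate n.toNat ' ') (List.range n.toNat)).getD i []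
      = List.replicate n.toNat ' ' := by
    rw [List.getD_eq_getElem _ _ (by simpa using hiN)]; simp
  simp only [hiN, if_true, hgd, row_closed]

-- closed form of port B under Pre_ for 0 < n
theorem B_closed (n : Int) (arr1 arr2 : List Int) (hn : 0 < n)
    (h1 : n ≤ (arr1.length : Int)) (h2 : n ≤ (arr2.length : Int)) :
    solution_alt n arr1 arr2
      = (List.range n.toNat).map (fun i => String.ofList (binChars n.toNat
          (((arr1.getD i 0) % ((2:Int)^n.toNat)).toNat |||
           ((arr2.getD i 0) % ((2:Int)^n.toNat)).toNat))) := by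
  have hN1 : n.toNat ≤ arr1.length := by omega
  have hN2 : n.toNat ≤ arr2.length := by omega
  unfold solution_alt
  rw [if_neg (by omega)]
  simp only [PySem.List.slice_to _ (by omega : (0:Int) ≤ n), Nat.shiftLeft_eq, one_mul,
    Nat.cast_pow, Nat.cast_ofNat,
    PySem.Int.mod_eq_emod_of_pos (by positivity : (0:Int) < 2 ^ n.toNat)]
  apply List.ext_getElem (by simp; omega)
  intro i h1 h2
  have hiN : i < n.toNat := by
    simp [List.length_zip] at h1; omega
  simp only [List.getElem_map, List.getElem_range, List.getElem_zip, List.getElem_take]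
  rw [List.getD_eq_getElem arr1 0 (show i < arr1.length by omega),
    List.getD_eq_getElem arr2 0 (show i < arr2.length by omega)]

-- ===== VERDICT (by name: the statement is the Claim_ definition above) =====
theorem solution_spec : Claim_equal_solution := by
  intro n arr1 arr2 _ hpre
  obtain ⟨h1, h2⟩ := hpre
  unfold Spec_solution
  by_cases hn : n ≤ 0
  · simp [solution, solution_alt, PySem.List.pyRange_one_eq_nil hn, hn]
  · rw [not_le] at hn
    rw [A_closed n arr1 arr2, B_closed n arr1 arr2 hn h1 h2]
    apply List.map_congr_left
    intro i hi
    have hiN : i < n.toNat := List.mem_range.mp hi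
    congr 1
    rw [binChars_eq]
    apply List.ext_getElem (by simp)
    intro j hj hj'
    have hjN : j < n.toNat := by simpa using hj
    have hrev : (((List.range n.toNat).map (fun k =>
        if (((arr1.getD i 0) % ((2:Int)^n.toNat)).toNat |||
            ((arr2.getD i 0) % ((2:Int)^n.toNat)).toNat).testBit k then '#' else ' ')).reverse)[j]'(by simpa using hjN)
        = (if (((arr1.getD i 0) % ((2:Int)^n.toNat)).toNat |||
            ((arr2.getD i 0) % ((2:Int)^n.toNat)).toNat).testBit (n.toNat - 1 - j) then '#' else ' ') := by
      rw [List.getElem_reverse]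
      simp
    simp only [List.getElem_map, List.getElem_range, hrev]
    rw [cell_eq n arr1 i j (by omega) hjN, cell_eq n arr2 i j (by omega) hjN, Nat.testBit_lor,
      testBit_emod _ _ _ (show n.toNat - 1 - j < n.toNat by omega),
      testBit_emod _ _ _ (show n.toNat - 1 - j < n.toNat by omega)]
    by_cases hb1 : bitf (n.toNat - 1 - j) (arr1.getD i 0) ≠ 0 <;>
      by_cases hb2 : bitf (n.toNat - 1 - j) (arr2.getD i 0) ≠ 0 <;>
      simp_all
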